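-- pv_equiv track=rewrite | github.com/Catamondium/scratch | Python/tarcmd/tarcmd.py | com_elide
-- ===== SOURCE A (Python) =====
-- def com_elide(a: str, b: str, toRight=True) -> str:
--     """
--     remove shortest from longest, Left to Right
--     so long as shortest prefixes longest
--     """
--     from itertools import dropwhile, zip_longest
--     from operator import add
--     from functools import reduce
--     if toRight:
--         pairs = ((x, y) for x, y in zip_longest(a, b))
--         tail = dropwhile(lambda x: x[0] == x[1], pairs)
--         side = 1 if len(a) < len(b) else 0
--         return reduce(add, (str(x[side]) for x in tail), '')
--     else:
--         return com_elide(a[::-1], b[::-1])[::-1]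
-- ===== SOURCE B (Python) =====
-- def com_elide(a: str, b: str, toRight=True) -> str:
--     """
--     remove shortest from longest, Left to Right
--     so long as shortest prefixes longest
--     """
--     if not toRight:
--         return com_elide(a[::-1], b[::-1], True)[::-1]
--     i = 0
--     while i < len(a) and i < len(b) and a[i] == b[i]:
--         i += 1
--     longer = a if len(a) >= len(b) else b
--     return longer[i:]
-- ===== Notes on version B (the rewrite author's own statement) =====
-- stated objective: faster
-- what changed: B replaces the zip_longest/dropwhile generator pipeline and the reduce-based character-by-character string concatenation with an explicit index loop that finds the common-prefix length followed by a single slice of the longer string.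
import Mathlib
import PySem

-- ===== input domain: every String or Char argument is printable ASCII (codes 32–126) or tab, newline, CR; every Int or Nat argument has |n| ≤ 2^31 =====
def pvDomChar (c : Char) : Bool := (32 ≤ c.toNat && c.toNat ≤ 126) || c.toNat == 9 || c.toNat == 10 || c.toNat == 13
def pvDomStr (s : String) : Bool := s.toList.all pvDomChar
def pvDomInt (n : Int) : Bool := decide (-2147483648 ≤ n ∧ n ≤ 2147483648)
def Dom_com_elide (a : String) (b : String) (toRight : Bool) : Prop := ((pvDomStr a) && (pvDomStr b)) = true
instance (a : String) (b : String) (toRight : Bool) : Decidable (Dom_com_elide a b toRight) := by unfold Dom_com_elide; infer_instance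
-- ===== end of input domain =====

-- B replaces A's zip_longest/dropwhile/reduce(add) pipeline with a prefix-length index scan plus one slice (no quadratic string concatenation); objective: faster (measured).

-- ===== PORT A =====
-- zip_longest(a, b) with fill value None
def pvZipL : List Char → List Char → List (Option Char × Option Char)
  | [], [] => []
  | [], d :: ys => (none, some d) :: pvZipL [] ys
  | c :: xs, [] => (some c, none) :: pvZipL xs []
  | c :: xs, d :: ys => (some c, some d) :: pvZipL xs ys

-- str(x) for x a char-or-None (str(None) = "None"; never reached on the chosen side)
def pvStrOpt : Option Char → String
  | some c => String.ofList [c]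
  | none => "None"

-- the toRight=True body of A: dropwhile equal pairs, pick side by length, reduce(add, …, '')
def com_elideR (a : String) (b : String) : String :=
  let tail := (pvZipL a.toList b.toList).dropWhile (fun p => p.1 == p.2)
  if a.toList.length < b.toList.length then
    tail.foldl (fun s p => s ++ pvStrOpt p.2) ""
  else
    tail.foldl (fun s p => s ++ pvStrOpt p.1) ""

def com_elide (a : String) (b : String) (toRight : Bool) : String :=
  if toRight then com_elideR a b
  else String.ofList ((com_elideR (String.ofList a.toList.reverse) (String.ofList b.toList.reverse)).toList.reverse)

-- ===== PORT B =====
-- the while loop: length of the common prefix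
def pvPlen : List Char → List Char → Nat
  | c :: xs, d :: ys => if c == d then pvPlen xs ys + 1 else 0
  | _, _ => 0

-- the toRight=True body of B: longer = a if len(a) >= len(b) else b; return longer[i:]
def com_elideR_alt (a : String) (b : String) : String :=
  let i := pvPlen a.toList b.toList
  let longer := if b.toList.length ≤ a.toList.length then a else b
  String.ofList (longer.toList.drop i)

def com_elide_alt (a : String) (b : String) (toRight : Bool) : String :=
  if toRight then com_elideR_alt a b
  else String.ofList ((com_elideR_alt (String.ofList a.toList.reverse) (String.ofList b.toList.reverse)).toList.reverse)

-- ===== PRECONDITION & SPEC =====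
def Spec_com_elide (a : String) (b : String) (toRight : Bool) (out : String) : Prop := out = com_elide_alt a b toRight
instance (a : String) (b : String) (toRight : Bool) (out : String) : Decidable (Spec_com_elide a b toRight out) := by unfold Spec_com_elide; infer_instance

-- ===== CLAIM (what is proved, stated in full; the proofs are below) =====
def Claim_equal_com_elide : Prop := ∀ (a : String) (b : String) (toRight : Bool), Dom_com_elide a b toRight → Spec_com_elide a b toRight (com_elide a b toRight)

-- ===== LEMMAS AND PROOFS =====

-- folding the first components over zip_longest, when a is at least as long, spells out a
theorem foldl_fst (x : List Char) : ∀ (y : List Char) (s : String),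
    y.length ≤ x.length →
    (pvZipL x y).foldl (fun s p => s ++ pvStrOpt p.1) s = s ++ String.ofList x := by
  induction x with
  | nil =>
    intro y s h
    cases y with
    | nil => simp [pvZipL]
    | cons d ys => simp at h
  | cons c xs ih =>
    intro y s h
    cases y with
    | nil =>
      simp only [pvZipL, List.foldl_cons]
      rw [ih [] _ (by simp)]
      simp [pvStrOpt, String.ext_iff]
    | cons d ys =>
      simp only [pvZipL, List.foldl_cons]
      rw [ih ys _ (by simpa using h)]
      simp [pvStrOpt, String.ext_iff]

-- folding the second components over zip_longest, when b is at least as long, spells out b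
theorem foldl_snd (x : List Char) : ∀ (y : List Char) (s : String),
    x.length ≤ y.length →
    (pvZipL x y).foldl (fun s p => s ++ pvStrOpt p.2) s = s ++ String.ofList y := by
  induction x with
  | nil =>
    intro y s _
    induction y generalizing s with
    | nil => simp [pvZipL]
    | cons d ys ihy =>
      simp only [pvZipL, List.foldl_cons]
      rw [ihy _ (by simp)]
      simp [pvStrOpt, String.ext_iff]
  | cons c xs ih =>
    intro y s h
    cases y with
    | nil => simp at h
    | cons d ys =>
      simp only [pvZipL, List.foldl_cons]
      rw [ih ys _ (by simpa using h)]
      simp [pvStrOpt, String.ext_iff]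

-- the core equivalence of the two right-elision bodies, on the character lists
theorem core (x : List Char) : ∀ y : List Char,
    (if x.length < y.length then
      ((pvZipL x y).dropWhile (fun p => p.1 == p.2)).foldl (fun s p => s ++ pvStrOpt p.2) ""
     else
      ((pvZipL x y).dropWhile (fun p => p.1 == p.2)).foldl (fun s p => s ++ pvStrOpt p.1) "")
    = String.ofList ((if y.length ≤ x.length then x else y).drop (pvPlen x y)) := by
  induction x with
  | nil =>
    intro y
    cases y with
    | nil => simp [pvZipL, pvPlen]
    | cons d ys =>
      simp only [pvPlen, List.length_nil, List.length_cons]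
      rw [if_pos (by omega), if_neg (by omega)]
      rw [show (pvZipL [] (d :: ys)).dropWhile (fun p => p.1 == p.2) = pvZipL [] (d :: ys) by
            rw [show pvZipL [] (d :: ys) = (none, some d) :: pvZipL [] ys by simp [pvZipL]]
            exact List.dropWhile_cons_of_neg (by simp)]
      rw [foldl_snd [] (d :: ys) _ (by simp)]
      simp
  | cons c xs ih =>
    intro y
    cases y with
    | nil =>
      simp only [pvPlen, List.length_nil, List.length_cons]
      rw [if_neg (by omega), if_pos (by omega)]
      rw [show (pvZipL (c :: xs) []).dropWhile (fun p => p.1 == p.2) = pvZipL (c :: xs) [] by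
            rw [show pvZipL (c :: xs) [] = (some c, none) :: pvZipL xs [] by simp [pvZipL]]
            exact List.dropWhile_cons_of_neg (by simp)]
      rw [foldl_fst (c :: xs) [] _ (by simp)]
      simp
    | cons d ys =>
      by_cases hcd : c = d
      · subst hcd
        have step : (pvZipL (c :: xs) (c :: ys)).dropWhile (fun p => p.1 == p.2)
            = (pvZipL xs ys).dropWhile (fun p => p.1 == p.2) := by
          rw [show pvZipL (c :: xs) (c :: ys) = (some c, some c) :: pvZipL xs ys by simp [pvZipL]]
          exact List.dropWhile_cons_of_pos (by simp)
        simp only [step, pvPlen, List.length_cons, beq_self_eq_true, if_true]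
        rw [apply_ite (List.drop (pvPlen xs ys + 1)), List.drop_succ_cons, List.drop_succ_cons,
            ← apply_ite (List.drop (pvPlen xs ys))]
        simpa [Nat.add_lt_add_iff_right, Nat.add_le_add_iff_right] using ih ys
      · have hbeq : (c == d) = false := by simpa using hcd
        have hz : (pvZipL (c :: xs) (d :: ys)).dropWhile (fun p => p.1 == p.2)
            = pvZipL (c :: xs) (d :: ys) := by
          rw [show pvZipL (c :: xs) (d :: ys) = (some c, some d) :: pvZipL xs ys by simp [pvZipL]]
          exact List.dropWhile_cons_of_neg (by simp [hbeq])
        simp only [hz, pvPlen, List.length_cons, hbeq, Bool.false_eq_true, if_false]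
        by_cases hl : xs.length < ys.length
        · rw [if_pos (by omega), if_neg (by omega)]
          rw [foldl_snd (c :: xs) (d :: ys) _ (by simp only [List.length_cons]; omega)]
          simp
        · rw [if_neg (by omega), if_pos (by omega)]
          rw [foldl_fst (c :: xs) (d :: ys) _ (by simp only [List.length_cons]; omega)]
          simp

theorem coreR (a b : String) : com_elideR a b = com_elideR_alt a b := by
  simp only [com_elideR, com_elideR_alt]
  rw [apply_ite String.toList]
  exact core a.toList b.toList

-- ===== VERDICT (by name: the statement is the Claim_ definition above) =====
theorem com_elide_spec : Claim_equal_com_elide := by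
  intro a b toRight _
  unfold Spec_com_elide com_elide com_elide_alt
  cases toRight <;> simp [coreR]
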